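-- pv_equiv track=rewrite | github.com/MrIncredibuell/advent-of-code-2024 | day21/main.py | part2
-- ===== SOURCE A (Python) =====
-- from functools import cache
--
-- grid1 = {
--     "7": (0, 0),
--     "8": (1, 0),
--     "9": (2, 0),
--     "4": (0, 1),
--     "5": (1, 1),
--     "6": (2, 1),
--     "1": (0, 2),
--     "2": (1, 2),
--     "3": (2, 2),
--     "0": (1, 3),
--     "A": (2, 3),
-- }
--
-- grid2 = {
--     "^": (1, 0),
--     "A": (2, 0),
--     "<": (0, 1),
--     "v": (1, 1),
--     ">": (2, 1),
-- }
--
-- def paths(grid):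
--     paths = {}
--     for source, (x1, y1) in grid.items():
--         for dest, (x2, y2) in grid.items():
--             path = "<" * (x1 - x2) + "v" * (y2 - y1) + "^" * (y1 - y2)  + ">" * (x2 - x1)
--             if ((x1, y2) not in grid.values()) or ((x2, y1) not in grid.values()):
--                 path = path[::-1]
--             paths[(source, dest)] = path + "A"
--     return paths
--
-- def part2(data):
--     p1s = paths(grid1)
--     p2s = paths(grid2)
--
--     @cache
--     def size(seq, i, first=False):
--         if i == 0:
--             return len(seq)
--         source = "A"
--         s = 0
--         paths = p1s if first else p2s
--         for dest in seq:
--             s += size(paths[(source, dest)], i-1)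
--             source = dest
--         return s
--
--     score = 0
--     for line in data[:]:
--         complexity = size(line, 26, first=True)
--
--         score += int(line[:3]) * complexity
--     return score
-- ===== SOURCE B (Python) =====
-- grid1 = {
--     "7": (0, 0),
--     "8": (1, 0),
--     "9": (2, 0),
--     "4": (0, 1),
--     "5": (1, 1),
--     "6": (2, 1),
--     "1": (0, 2),
--     "2": (1, 2),
--     "3": (2, 2),
--     "0": (1, 3),
--     "A": (2, 3),
-- }
--
-- grid2 = {
--     "^": (1, 0),
--     "A": (2, 0),
--     "<": (0, 1),
--     "v": (1, 1),
--     ">": (2, 1),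
-- }
--
-- def paths(grid):
--     paths = {}
--     for source, (x1, y1) in grid.items():
--         for dest, (x2, y2) in grid.items():
--             path = "<" * (x1 - x2) + "v" * (y2 - y1) + "^" * (y1 - y2)  + ">" * (x2 - x1)
--             if ((x1, y2) not in grid.values()) or ((x2, y1) not in grid.values()):
--                 path = path[::-1]
--             paths[(source, dest)] = path + "A"
--     return paths
--
-- def trans(seq):
--     """Adjacent key pairs pressed while typing seq, starting from 'A'."""
--     return list(zip("A" + seq, seq))
--
-- def part2(data):
--     p1s = paths(grid1)
--     p2s = paths(grid2)
--     pairs = list(p2s)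
--     # T[pair] == final length contributed by one press of pair after k
--     # further directional-robot expansions (k = 0 initially, 24 at the end).
--     T = {pr: len(p2s[pr]) for pr in pairs}
--     for _ in range(24):
--         T = {pr: sum(T[q] for q in trans(p2s[pr])) for pr in pairs}
--     U = {pr: sum(T[q] for q in trans(p1s[pr])) for pr in p1s}
--     score = 0
--     for line in data:
--         complexity = sum(U[pr] for pr in trans(line))
--         score += int(line[:3]) * complexity
--     return score
-- ===== Notes on version B (the rewrite author's own statement) =====
-- stated objective: alternative
-- what changed: A computes each line's length by a depth-26 memoized top-down recursion over key sequences; B instead precomputes bottom-up per-pair cost tables (24 iterations of a 25-entry directional table, then one numeric-pair table) and scores each line with a single pass over its adjacent key pairs.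
import Mathlib
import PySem

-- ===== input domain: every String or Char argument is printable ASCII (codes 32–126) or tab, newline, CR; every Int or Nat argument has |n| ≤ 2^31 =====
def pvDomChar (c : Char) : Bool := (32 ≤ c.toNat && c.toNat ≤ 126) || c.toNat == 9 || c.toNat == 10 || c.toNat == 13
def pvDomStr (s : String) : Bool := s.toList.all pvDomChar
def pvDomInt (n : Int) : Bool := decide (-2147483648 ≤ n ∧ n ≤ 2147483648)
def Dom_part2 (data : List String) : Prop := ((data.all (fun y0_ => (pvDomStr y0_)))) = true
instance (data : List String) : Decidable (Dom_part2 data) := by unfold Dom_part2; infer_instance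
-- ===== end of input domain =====

-- B replaces A's depth-26 memoized recursion by a bottom-up 25-entry DP table over directional
-- key pairs (alternative decomposition; same results).

-- ===== PORT A =====
-- shared module context: the two keypad grids and the `paths` helper (used verbatim by both A and B)
def grid1D : PySem.Dict Char (Int × Int) := PySem.Dict.ofList
  [('7',(0,0)), ('8',(1,0)), ('9',(2,0)), ('4',(0,1)), ('5',(1,1)), ('6',(2,1)),
   ('1',(0,2)), ('2',(1,2)), ('3',(2,2)), ('0',(1,3)), ('A',(2,3))]

def grid2D : PySem.Dict Char (Int × Int) := PySem.Dict.ofList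
  [('^',(1,0)), ('A',(2,0)), ('<',(0,1)), ('v',(1,1)), ('>',(2,1))]

-- "c" * n for possibly negative n (empty then) — Int.toNat clamps negatives to 0, exactly Python
def repChar (c : Char) (n : Int) : List Char := List.replicate n.toNat c

-- body of the inner loop of `paths(grid)`: the path string stored for (source, dest)
def pathFor (grid : PySem.Dict Char (Int × Int)) (p q : Char × (Int × Int)) : List Char :=
  let path := repChar '<' (p.2.1 - q.2.1) ++ repChar 'v' (q.2.2 - p.2.2) ++
              repChar '^' (p.2.2 - q.2.2) ++ repChar '>' (q.2.1 - p.2.1)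
  let path := if !(grid.values.contains (p.2.1, q.2.2)) || !(grid.values.contains (q.2.1, p.2.2))
              then path.reverse else path
  path ++ ['A']

-- literal port of `paths(grid)`
def pathsFn (grid : PySem.Dict Char (Int × Int)) : PySem.Dict (Char × Char) (List Char) :=
  grid.items.foldl (fun acc p =>
    grid.items.foldl (fun acc q =>
      acc.insert (p.1, q.1) (pathFor grid p q)) acc) PySem.Dict.empty

-- `p1s = paths(grid1)`, `p2s = paths(grid2)` (A binds them inside part2; pure values, shared here)
def p1sD : PySem.Dict (Char × Char) (List Char) := pathsFn grid1D
def p2sD : PySem.Dict (Char × Char) (List Char) := pathsFn grid2D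

-- functools.cache of `size`, keyed like CPython: (seq, i, first)
abbrev Cache := PySem.Dict (List Char × Nat × Bool) Int

-- the `for dest in seq` loop of `size`, threading the cache; `none` = Python KeyError
def sizeLoopM (f : List Char → Cache → Option (Int × Cache))
    (ps : PySem.Dict (Char × Char) (List Char)) :
    Char → List Char → Int → Cache → Option (Int × Cache)
  | _, [], s, cache => some (s, cache)
  | source, dest :: rest, s, cache =>
    match ps.get? (source, dest) with
    | none => none
    | some path =>
      match f path cache with
      | none => none
      | some (v, c) => sizeLoopM f ps dest rest (s + v) c

-- literal port of `@cache def size(seq, i, first=False)` (cache checked first, filled on return)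
def sizeM : Nat → List Char → Bool → Cache → Option (Int × Cache)
  | 0, seq, first, cache =>
    match cache.get? (seq, 0, first) with
    | some v => some (v, cache)
    | none => some (PySem.List.len seq, cache.insert (seq, 0, first) (PySem.List.len seq))
  | i + 1, seq, first, cache =>
    match cache.get? (seq, i + 1, first) with
    | some v => some (v, cache)
    | none =>
      match sizeLoopM (fun p c => sizeM i p false c) (if first then p1sD else p2sD) 'A' seq 0 cache with
      | none => none
      | some (s, c) => some (s, c.insert (seq, i + 1, first) s)

def part2 (data : List String) : Int :=
  (data.foldl (fun (st : Int × Cache) line =>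
      match sizeM 26 line.toList true st.2 with
      | none => st  -- Python raises KeyError here; Pre_part2 excludes these inputs
      | some (complexity, c) =>
        (st.1 + ((PySem.Int.ofChars? (PySem.List.slice line.toList none (some 3))).getD 0) * complexity,
         c))
    (0, PySem.Dict.empty)).1

-- ===== PORT B =====
-- trans(seq) = list(zip("A" + seq, seq))
def transB (s : List Char) : List (Char × Char) := List.zip ('A' :: s) s

-- T = {pr: len(p2s[pr]) for pr in pairs} (a dict comprehension inserts key by key)
def T0D : PySem.Dict (Char × Char) Int :=
  p2sD.keys.foldl (fun d pr => d.insert pr (PySem.List.len (p2sD.getD pr []))) PySem.Dict.empty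

-- one iteration of the loop body: {pr: sum(T[q] for q in trans(p2s[pr])) for pr in pairs}
def stepT (T : PySem.Dict (Char × Char) Int) : PySem.Dict (Char × Char) Int :=
  p2sD.keys.foldl (fun d pr =>
    d.insert pr (((transB (p2sD.getD pr [])).map (fun q => T.getD q 0)).sum)) PySem.Dict.empty

-- `for _ in range(24): T = {...}`
def iterT : Nat → PySem.Dict (Char × Char) Int
  | 0 => T0D
  | n + 1 => stepT (iterT n)

-- U = {pr: sum(T[q] for q in trans(p1s[pr])) for pr in p1s}
def mkU (T : PySem.Dict (Char × Char) Int) : PySem.Dict (Char × Char) Int :=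
  p1sD.keys.foldl (fun d pr =>
    d.insert pr (((transB (p1sD.getD pr [])).map (fun q => T.getD q 0)).sum)) PySem.Dict.empty

def part2_alt (data : List String) : Int :=
  let U := mkU (iterT 24)
  data.foldl (fun score line =>
    score + ((PySem.Int.ofChars? (PySem.List.slice line.toList none (some 3))).getD 0) *
      ((transB line.toList).map (fun pr => U.getD pr 0)).sum) 0

-- ===== PRECONDITION & SPEC =====
def numKeys : List Char := ['7','8','9','4','5','6','1','2','3','0','A']

-- Pre_ excludes exactly the inputs where A raises: a line with a character outside the numeric
-- keypad (KeyError in size) or whose first ≤3 characters are not a valid int literal (ValueError).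
def Pre_part2 (data : List String) : Prop :=
  ∀ line ∈ data, (line.toList.all (fun c => numKeys.contains c)) = true ∧
    (PySem.Int.ofChars? (PySem.List.slice line.toList none (some 3))).isSome = true
instance (data : List String) : Decidable (Pre_part2 data) := by unfold Pre_part2; infer_instance

def pvWitness_part2 : List String := (["029A"])

def Spec_part2 (data : List String) (out : Int) : Prop := out = part2_alt data
instance (data : List String) (out : Int) : Decidable (Spec_part2 data out) := by unfold Spec_part2; infer_instance

-- ===== CLAIM (what is proved, stated in full; the proofs are below) =====
def Claim_equal_part2 : Prop := ∀ (data : List String), Dom_part2 data → Pre_part2 data → Spec_part2 data (part2 data)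

-- ===== LEMMAS AND PROOFS =====
def dirKeys : List Char := ['^','A','<','v','>']

lemma get?_eq_some_getD {κ ν : Type} [BEq κ] [LawfulBEq κ] (d : PySem.Dict κ ν) (k : κ)
    (dflt : ν) (h : k ∈ d.keys) : d.get? k = some (d.getD k dflt) := by
  cases hg : d.get? k with
  | none =>
    rw [PySem.Dict.get?_eq_none_iff_not_mem_keys] at hg
    exact absurd h hg
  | some v => rw [PySem.Dict.getD_of_get?_eq_some d dflt hg]

lemma getD_comp {κ : Type} [BEq κ] [LawfulBEq κ] (l : List κ) (v : κ → Int)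
    (hnd : l.Nodup) (pr : κ) (hpr : pr ∈ l) :
    (l.foldl (fun d a => d.insert a (v a)) PySem.Dict.empty).getD pr 0 = v pr := by
  have hitems := PySem.Dict.items_foldl_insert_fresh (d := PySem.Dict.empty) (l := l)
    (k := fun a => a) (v := v) (by simp [PySem.Dict.contains_empty]) (by simpa using hnd)
  apply PySem.Dict.getD_of_mem_items
  · rw [hitems]
    refine List.mem_append.mpr (Or.inr ?_)
    exact List.mem_map_of_mem (f := fun a => (a, v a)) hpr
  · simp only [PySem.Dict.keys, hitems, List.map_append, List.map_map]
    simpa [PySem.Dict.empty, Function.comp_def] using hnd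

-- chars of every stored path lie in dirKeys
lemma chars_pathFor (grid : PySem.Dict Char (Int × Int)) (p q : Char × (Int × Int)) :
    ∀ c ∈ pathFor grid p q, c ∈ dirKeys := by
  intro c hc
  unfold pathFor at hc
  simp only [List.mem_append] at hc
  rcases hc with hc | hc
  · have hc' : c ∈ repChar '<' (p.2.1 - q.2.1) ++ repChar 'v' (q.2.2 - p.2.2) ++
        repChar '^' (p.2.2 - q.2.2) ++ repChar '>' (q.2.1 - p.2.1) := by
      split at hc
      · exact List.mem_reverse.mp hc
      · exact hc
    simp only [repChar, List.mem_append, List.mem_replicate] at hc'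
    rcases hc' with ((⟨_, rfl⟩ | ⟨_, rfl⟩) | ⟨_, rfl⟩) | ⟨_, rfl⟩ <;> decide
  · simp only [List.mem_singleton] at hc
    rw [hc]; decide

lemma values_insert_fold {α κ : Type} [BEq κ] [LawfulBEq κ] (P : List Char → Prop) (l : List α)
    (key : α → κ) (val : α → List Char) (hval : ∀ a ∈ l, P (val a)) :
    ∀ (d : PySem.Dict κ (List Char)), (∀ v ∈ d.values, P v) →
      ∀ v ∈ (l.foldl (fun d a => d.insert (key a) (val a)) d).values, P v := by
  induction l with
  | nil => intro d hd; exact hd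
  | cons a t ih =>
    intro d hd
    refine ih (fun x hx => hval x (by simp [hx])) _ ?_
    intro v hv
    rcases PySem.Dict.mem_values_insert d (key a) (val a) v hv with rfl | hv'
    · exact hval a (by simp)
    · exact hd v hv'

lemma chars_values_pathsFn (grid : PySem.Dict Char (Int × Int)) :
    ∀ v ∈ (pathsFn grid).values, ∀ c ∈ v, c ∈ dirKeys := by
  unfold pathsFn
  have main : ∀ (L : List (Char × (Int × Int))) (d : PySem.Dict (Char × Char) (List Char)),
      (∀ v ∈ d.values, ∀ c ∈ v, c ∈ dirKeys) →
      ∀ v ∈ (L.foldl (fun acc p => grid.items.foldl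
        (fun acc q => acc.insert (p.1, q.1) (pathFor grid p q)) acc) d).values,
        ∀ c ∈ v, c ∈ dirKeys := by
    intro L
    induction L with
    | nil => intro d hd; exact hd
    | cons p t ih =>
      intro d hd
      exact ih _ (values_insert_fold _ grid.items (fun q => (p.1, q.1))
        (fun q => pathFor grid p q) (fun q _ => chars_pathFor grid p q) d hd)
  exact main grid.items PySem.Dict.empty (by simp [PySem.Dict.values, PySem.Dict.empty])

lemma chars_pathsFn (grid : PySem.Dict Char (Int × Int)) (pr : Char × Char) (v : List Char)
    (hget : (pathsFn grid).get? pr = some v) : ∀ c ∈ v, c ∈ dirKeys := by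
  have hitem : (pr, v) ∈ (pathsFn grid).items := by
    apply PySem.Dict.mem_items_of_get?_eq_some
    exact hget
  exact chars_values_pathsFn grid v
    (by simpa [PySem.Dict.values] using List.mem_map_of_mem (f := fun p => p.2) hitem)

lemma nodup_keys_pathsFn (grid : PySem.Dict Char (Int × Int)) : (pathsFn grid).keys.Nodup := by
  unfold pathsFn
  have main : ∀ (L : List (Char × (Int × Int))) (d : PySem.Dict (Char × Char) (List Char)),
      d.keys.Nodup →
      (L.foldl (fun acc p => grid.items.foldl
        (fun acc q => acc.insert (p.1, q.1) (pathFor grid p q)) acc) d).keys.Nodup := by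
    intro L
    induction L with
    | nil => intro d hd; exact hd
    | cons p t ih =>
      intro d hd
      exact ih _ (PySem.Dict.nodup_keys_foldl_insert_key grid.items (fun q => (p.1, q.1))
        (fun d q => pathFor grid p q) d hd)
  exact main grid.items PySem.Dict.empty PySem.Dict.nodup_keys_empty

lemma keys_grow (grid : PySem.Dict Char (Int × Int)) :
    ∀ (L : List (Char × (Int × Int))) (d : PySem.Dict (Char × Char) (List Char)) (k0 : Char × Char),
      k0 ∈ d.keys →
      k0 ∈ (L.foldl (fun acc p => grid.items.foldl
        (fun acc q => acc.insert (p.1, q.1) (pathFor grid p q)) acc) d).keys := by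
  intro L
  induction L with
  | nil => intro d k0 h; exact h
  | cons p t ih =>
    intro d k0 h
    refine ih _ k0 ?_
    rw [PySem.Dict.keys_foldl_insert_key grid.items (fun q => (p.1, q.1))
      (fun d q => pathFor grid p q) d]
    exact (PySem.Set.mem_update _ _ _).mpr (Or.inl h)

lemma mem_keys_pathsFn (grid : PySem.Dict Char (Int × Int)) (a b : Char)
    (ha : a ∈ grid.keys) (hb : b ∈ grid.keys) : (a, b) ∈ (pathsFn grid).keys := by
  unfold pathsFn
  obtain ⟨pa, hpa, hpa1⟩ := List.mem_map.mp ha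
  obtain ⟨pb, hpb, hpb1⟩ := List.mem_map.mp hb
  have main : ∀ (L : List (Char × (Int × Int))) (d : PySem.Dict (Char × Char) (List Char)),
      pa ∈ L →
      (a, b) ∈ (L.foldl (fun acc p => grid.items.foldl
        (fun acc q => acc.insert (p.1, q.1) (pathFor grid p q)) acc) d).keys := by
    intro L
    induction L with
    | nil => intro d h; exact absurd h (List.not_mem_nil)
    | cons p t ih =>
      intro d hmem
      rcases List.mem_cons.mp hmem with rfl | hmem'
      · refine keys_grow grid t _ (a, b) ?_
        rw [PySem.Dict.keys_foldl_insert_key grid.items (fun q => (pa.1, q.1))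
          (fun d q => pathFor grid pa q) d]
        refine (PySem.Set.mem_update _ _ _).mpr (Or.inr ?_)
        rw [← hpa1, ← hpb1]
        exact List.mem_map_of_mem (f := fun q => (pa.1, q.1)) hpb
      · exact ih _ hmem'
  exact main grid.items PySem.Dict.empty hpa

set_option maxRecDepth 30000 in
lemma keys_grid1 : grid1D.keys = numKeys := by decide

set_option maxRecDepth 30000 in
lemma keys_grid2 : grid2D.keys = dirKeys := by decide

lemma fact_p2_get : ∀ a ∈ dirKeys, ∀ b ∈ dirKeys,
    p2sD.get? (a, b) = some (p2sD.getD (a, b) []) ∧ ∀ c ∈ p2sD.getD (a, b) [], c ∈ dirKeys := by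
  intro a ha b hb
  have hk : (a, b) ∈ p2sD.keys :=
    mem_keys_pathsFn grid2D a b (keys_grid2 ▸ ha) (keys_grid2 ▸ hb)
  have hget := get?_eq_some_getD p2sD (a, b) [] hk
  exact ⟨hget, chars_pathsFn grid2D (a, b) _ hget⟩

lemma fact_p1_get : ∀ a ∈ numKeys, ∀ b ∈ numKeys,
    p1sD.get? (a, b) = some (p1sD.getD (a, b) []) ∧ ∀ c ∈ p1sD.getD (a, b) [], c ∈ dirKeys := by
  intro a ha b hb
  have hk : (a, b) ∈ p1sD.keys :=
    mem_keys_pathsFn grid1D a b (keys_grid1 ▸ ha) (keys_grid1 ▸ hb)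
  have hget := get?_eq_some_getD p1sD (a, b) [] hk
  exact ⟨hget, chars_pathsFn grid1D (a, b) _ hget⟩

lemma fact_T0 : ∀ a ∈ dirKeys, ∀ b ∈ dirKeys,
    T0D.getD (a, b) 0 = PySem.List.len (p2sD.getD (a, b) []) := by
  intro a ha b hb
  exact getD_comp p2sD.keys _ (nodup_keys_pathsFn grid2D) (a, b)
    (mem_keys_pathsFn grid2D a b (keys_grid2 ▸ ha) (keys_grid2 ▸ hb))

lemma fact_step : ∀ a ∈ dirKeys, ∀ b ∈ dirKeys, ∀ T,
    (stepT T).getD (a, b) 0 = ((transB (p2sD.getD (a, b) [])).map (fun q => T.getD q 0)).sum := by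
  intro a ha b hb T
  exact getD_comp p2sD.keys _ (nodup_keys_pathsFn grid2D) (a, b)
    (mem_keys_pathsFn grid2D a b (keys_grid2 ▸ ha) (keys_grid2 ▸ hb))

lemma fact_U : ∀ a ∈ numKeys, ∀ b ∈ numKeys, ∀ T,
    (mkU T).getD (a, b) 0 = ((transB (p1sD.getD (a, b) [])).map (fun q => T.getD q 0)).sum := by
  intro a ha b hb T
  exact getD_comp p1sD.keys _ (nodup_keys_pathsFn grid1D) (a, b)
    (mem_keys_pathsFn grid1D a b (keys_grid1 ▸ ha) (keys_grid1 ▸ hb))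

-- pure (cache-free) version of `size`, used only by the proofs
def sizeLoop (f : List Char → Option Int) (ps : PySem.Dict (Char × Char) (List Char)) :
    Char → List Char → Int → Option Int
  | _, [], s => some s
  | source, dest :: rest, s =>
    match ps.get? (source, dest) with
    | none => none
    | some path =>
      match f path with
      | none => none
      | some v => sizeLoop f ps dest rest (s + v)

def sizeA : Nat → List Char → Bool → Option Int
  | 0, seq, _ => some (PySem.List.len seq)
  | i + 1, seq, first => sizeLoop (fun p => sizeA i p false) (if first then p1sD else p2sD) 'A' seq 0

-- cache invariant: every memo entry holds the pure value
def Good (cache : Cache) : Prop :=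
  ∀ key v, (key, v) ∈ cache.items → sizeA key.2.1 key.1 key.2.2 = some v

lemma good_empty : Good PySem.Dict.empty := by
  intro key v hv
  simp [PySem.Dict.empty] at hv

lemma good_insert {cache : Cache} (h : Good cache) {seq : List Char} {i : Nat} {first : Bool}
    {v : Int} (hv : sizeA i seq first = some v) : Good (cache.insert (seq, i, first) v) := by
  intro key w hw
  rcases (PySem.Dict.mem_items_insert _ _ _ _).mp hw with heq | ⟨hmem, _⟩
  · cases heq; exact hv
  · exact h key w hmem

lemma sizeLoopM_spec (fp : List Char → Option Int) (f : List Char → Cache → Option (Int × Cache))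
    (ps : PySem.Dict (Char × Char) (List Char))
    (hf : ∀ p cache, Good cache →
      (fp p = none ∧ f p cache = none) ∨
      ∃ v c', fp p = some v ∧ f p cache = some (v, c') ∧ Good c') :
    ∀ (seq : List Char) (src : Char) (s : Int) (cache : Cache), Good cache →
      (sizeLoop fp ps src seq s = none ∧ sizeLoopM f ps src seq s cache = none) ∨
      ∃ v c', sizeLoop fp ps src seq s = some v ∧ sizeLoopM f ps src seq s cache = some (v, c') ∧ Good c' := by
  intro seq
  induction seq with
  | nil => intro src s cache hc; exact Or.inr ⟨s, cache, rfl, rfl, hc⟩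
  | cons d rest ih =>
    intro src s cache hc
    cases hget : ps.get? (src, d) with
    | none => simp [sizeLoop, sizeLoopM, hget]
    | some path =>
      rcases hf path cache hc with ⟨hp1, hp2⟩ | ⟨v, c', hp1, hp2, hc'⟩
      · simp [sizeLoop, sizeLoopM, hget, hp1, hp2]
      · simp only [sizeLoop, sizeLoopM, hget, hp1, hp2]
        exact ih d (s + v) c' hc'

lemma sizeM_spec : ∀ (i : Nat) (seq : List Char) (first : Bool) (cache : Cache), Good cache →
    (sizeA i seq first = none ∧ sizeM i seq first cache = none) ∨
    ∃ v c', sizeA i seq first = some v ∧ sizeM i seq first cache = some (v, c') ∧ Good c' := by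
  intro i
  induction i with
  | zero =>
    intro seq first cache hc
    cases hget : cache.get? (seq, 0, first) with
    | some v =>
      have hmem : ((seq, 0, first), v) ∈ cache.items := by
        apply PySem.Dict.mem_items_of_get?_eq_some
        exact hget
      refine Or.inr ⟨v, cache, hc _ _ hmem, ?_, hc⟩
      simp only [sizeM, hget]
    | none =>
      have hpure : sizeA 0 seq first = some (PySem.List.len seq) := by rw [sizeA]
      refine Or.inr ⟨PySem.List.len seq, cache.insert (seq, 0, first) (PySem.List.len seq),
        hpure, ?_, good_insert hc hpure⟩
      simp only [sizeM, hget]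
  | succ i ih =>
    intro seq first cache hc
    cases hget : cache.get? (seq, i + 1, first) with
    | some v =>
      have hmem : ((seq, i + 1, first), v) ∈ cache.items := by
        apply PySem.Dict.mem_items_of_get?_eq_some
        exact hget
      refine Or.inr ⟨v, cache, hc _ _ hmem, ?_, hc⟩
      simp only [sizeM, hget]
    | none =>
      have hloop := sizeLoopM_spec (fun p => sizeA i p false) (fun p c => sizeM i p false c)
        (if first then p1sD else p2sD) (fun p cache hcg => ih p false cache hcg) seq 'A' 0 cache hc
      rcases hloop with ⟨h1, h2⟩ | ⟨v, c', h1, h2, hc'⟩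
      · refine Or.inl ⟨?_, ?_⟩
        · rw [sizeA]; exact h1
        · simp only [sizeM, hget, h2]
      · have hpure : sizeA (i + 1) seq first = some v := by rw [sizeA]; exact h1
        refine Or.inr ⟨v, c'.insert (seq, i + 1, first) v, hpure, ?_, good_insert hc' hpure⟩
        simp only [sizeM, hget, h2]

lemma sizeLoop_sum (f : List Char → Option Int) (ps : PySem.Dict (Char × Char) (List Char))
    (K : List Char) (g : Char × Char → Int)
    (H : ∀ a ∈ K, ∀ b ∈ K, ∃ p, ps.get? (a, b) = some p ∧ f p = some (g (a, b))) :
    ∀ (seq : List Char) (src : Char) (s : Int), src ∈ K → (∀ c ∈ seq, c ∈ K) →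
      sizeLoop f ps src seq s = some (s + ((List.zip (src :: seq) seq).map g).sum) := by
  intro seq
  induction seq with
  | nil => intro src s _ _; simp [sizeLoop]
  | cons d rest ih =>
    intro src s hs hseq
    obtain ⟨p, hp, hf⟩ := H src hs d (hseq d (by simp))
    rw [sizeLoop, hp]
    simp only [hf]
    rw [ih d (s + g (src, d)) (hseq d (by simp)) (fun c hc => hseq c (by simp [hc]))]
    simp [List.zip_cons_cons]
    ring

lemma sizeA_false (k : Nat) : ∀ seq, (∀ c ∈ seq, c ∈ dirKeys) →
    sizeA (k + 1) seq false = some (((transB seq).map (fun q => (iterT k).getD q 0)).sum) := by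
  induction k with
  | zero =>
    intro seq hseq
    rw [sizeA]
    have := sizeLoop_sum (fun p => sizeA 0 p false) p2sD dirKeys
      (fun q => (iterT 0).getD q 0)
      (by
        intro a ha b hb
        obtain ⟨hget, _⟩ := fact_p2_get a ha b hb
        refine ⟨p2sD.getD (a, b) [], hget, ?_⟩
        show sizeA 0 (p2sD.getD (a, b) []) false = some ((iterT 0).getD (a, b) 0)
        rw [sizeA, show iterT 0 = T0D from rfl, fact_T0 a ha b hb])
      seq 'A' 0 (by decide) hseq
    simpa [transB] using this
  | succ k ih =>
    intro seq hseq
    rw [sizeA]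
    have := sizeLoop_sum (fun p => sizeA (k + 1) p false) p2sD dirKeys
      (fun q => (iterT (k + 1)).getD q 0)
      (by
        intro a ha b hb
        obtain ⟨hget, hchars⟩ := fact_p2_get a ha b hb
        refine ⟨p2sD.getD (a, b) [], hget, ?_⟩
        show sizeA (k + 1) (p2sD.getD (a, b) []) false = some ((iterT (k + 1)).getD (a, b) 0)
        rw [ih _ hchars, show iterT (k + 1) = stepT (iterT k) from rfl,
            fact_step a ha b hb (iterT k)])
      seq 'A' 0 (by decide) hseq
    simpa [transB] using this

lemma sizeA_line (line : List Char) (h : ∀ c ∈ line, c ∈ numKeys) :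
    sizeA 26 line true =
      some (((transB line).map (fun pr =>
        ((transB (p1sD.getD pr [])).map (fun q => (iterT 24).getD q 0)).sum)).sum) := by
  rw [show sizeA 26 line true = sizeLoop (fun p => sizeA 25 p false) p1sD 'A' line 0 from rfl]
  have := sizeLoop_sum (fun p => sizeA 25 p false) p1sD numKeys
    (fun pr => ((transB (p1sD.getD pr [])).map (fun q => (iterT 24).getD q 0)).sum)
    (by
      intro a ha b hb
      obtain ⟨hget, hchars⟩ := fact_p1_get a ha b hb
      exact ⟨p1sD.getD (a, b) [], hget, sizeA_false 24 _ hchars⟩)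
    line 'A' 0 (by decide) h
  simpa [transB] using this

lemma chars_of_all {line : List Char} (h : (line.all (fun c => numKeys.contains c)) = true) :
    ∀ c ∈ line, c ∈ numKeys := by
  intro c hc
  simpa using List.all_eq_true.mp h c hc

set_option maxRecDepth 8000 in
lemma line_eq' (line : List Char) (h : ∀ c ∈ line, c ∈ numKeys) :
    sizeA 26 line true = some (((transB line).map (fun pr => (mkU (iterT 24)).getD pr 0)).sum) := by
  rw [sizeA_line line h]
  congr 1
  refine congrArg List.sum (List.map_congr_left ?_)
  intro pr hpr
  have hmem := List.of_mem_zip (by simpa [transB] using hpr)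
  have h1 : pr.1 ∈ numKeys := by
    rcases List.mem_cons.mp hmem.1 with h' | h'
    · rw [h']; decide
    · exact h pr.1 h'
  exact (fact_U pr.1 h1 pr.2 (h pr.2 hmem.2) (iterT 24)).symm

set_option maxRecDepth 8000 in
lemma fold_eq : ∀ (lines : List String) (score : Int) (cache : Cache), Good cache →
    (∀ line ∈ lines, (line.toList.all (fun c => numKeys.contains c)) = true) →
    (lines.foldl (fun (st : Int × Cache) line =>
        match sizeM 26 line.toList true st.2 with
        | none => st
        | some (complexity, c) =>
          (st.1 + ((PySem.Int.ofChars? (PySem.List.slice line.toList none (some 3))).getD 0) * complexity,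
           c)) (score, cache)).1 =
    lines.foldl (fun score line =>
        score + ((PySem.Int.ofChars? (PySem.List.slice line.toList none (some 3))).getD 0) *
          ((transB line.toList).map (fun pr => (mkU (iterT 24)).getD pr 0)).sum) score := by
  intro lines
  induction lines with
  | nil => intro score cache _ _; rfl
  | cons line rest ih =>
    intro score cache hgood hpre
    have hA : sizeA 26 line.toList true =
        some (((transB line.toList).map (fun pr => (mkU (iterT 24)).getD pr 0)).sum) :=
      line_eq' line.toList (chars_of_all (hpre line (by simp)))
    rcases sizeM_spec 26 line.toList true cache hgood with ⟨h1, _⟩ | ⟨v, c', h1, h2, hc'⟩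
    · rw [hA] at h1; cases h1
    · rw [hA] at h1
      injection h1 with h1
      simp only [List.foldl_cons, h2, ← h1]
      exact ih _ c' hc' (fun l hl => hpre l (by simp [hl]))

set_option maxRecDepth 8000 in
theorem part2_spec : Claim_equal_part2 := by
  intro data _ hpre
  unfold Spec_part2 part2 part2_alt
  exact fold_eq data 0 PySem.Dict.empty good_empty (fun line hl => (hpre line hl).1)
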